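-- pv_equiv track=rewrite | github.com/ceholden/yatsm | yatsm/regression/__init__.py | design_to_indices
-- ===== SOURCE A (Python) =====
-- design_coefs = ['all',
--                 'intercept', 'slope',
--                 'seasonality', 'categorical',
--                 'rmse']
--
-- def _key_lookup_ignorecase(d, key):
--     """ Search dict for key, ignoring case
--
--     Args:
--       d (dict): dict to search
--       key (str): key to search for
--
--     Returns:
--       str or None: key in dict `d` matching `key` if found; else None
--
--     """
--     key = [k for k in d.keys() if key.lower() == k.lower()]
--     if key:
--         return key[0]
--     else:
--         return None
--
-- def design_to_indices(design_matrix, features):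
--     """ Return indices of coefficients for features in design matrix
--
--     Args:
--       design_matrix (OrderedDict): OrderedDict containing design features keys
--         and indices of coefficient matrix as values
--       features (list): list of feature coefficients to extract
--
--     Return:
--       tuple: list of indices and names for each feature specified in `features`
--
--     """
--     if 'all' in features:
--         features = design_coefs[1:]
--
--     i_coefs = []
--     coef_names = []
--     for c in features:
--         if c == 'intercept':
--             k = _key_lookup_ignorecase(design_matrix, 'intercept')
--             i_coefs.append(design_matrix.get(k))
--             coef_names.append(k)
--         elif c == 'slope':
--             k = _key_lookup_ignorecase(design_matrix, 'x')
--             i_coefs.append(design_matrix.get(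
--                 _key_lookup_ignorecase(design_matrix, 'x')))
--             coef_names.append(k)
--         elif c == 'seasonality':
--             i = [k for k in design_matrix.keys() if 'harm' in k]
--             i_coefs.extend([design_matrix[_i] for _i in i])
--             coef_names.extend(i)
--         elif c == 'categorical':
--             i = [k for k in design_matrix.keys() if 'C' in k]
--             i_coefs.extend([design_matrix[_i] for _i in i])
--             coef_names.extend(i)
--
--     i_coefs = [i for i in i_coefs if i is not None]
--     coef_names = [n for n in coef_names if n is not None]
--
--     return i_coefs, coef_names
-- ===== SOURCE B (Python) =====
-- design_coefs = ['all',
--                 'intercept', 'slope',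
--                 'seasonality', 'categorical',
--                 'rmse']
--
-- def design_to_indices(design_matrix, features):
--     """One pass over the design matrix builds buckets of matching keys per
--     feature category; features are then answered by table lookup only."""
--     if 'all' in features:
--         features = design_coefs[1:]
--     intercept, slope, harm, cat = [], [], [], []
--     for k in design_matrix:
--         lk = k.lower()
--         if lk == 'intercept' and not intercept:
--             intercept.append(k)
--         if lk == 'x' and not slope:
--             slope.append(k)
--         if 'harm' in k:
--             harm.append(k)
--         if 'C' in k:
--             cat.append(k)
--     buckets = {'intercept': intercept, 'slope': slope,
--                'seasonality': harm, 'categorical': cat}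
--     i_coefs, coef_names = [], []
--     for c in features:
--         for k in buckets.get(c, ()):
--             i_coefs.append(design_matrix[k])
--             coef_names.append(k)
--     return i_coefs, coef_names
-- ===== Notes on version B (the rewrite author's own statement) =====
-- stated objective: alternative
-- what changed: Instead of A's if/elif dispatch that rescans the design matrix's keys for every feature and post-filters None entries, B makes ONE pass over the design-matrix keys building four per-category buckets (first case-insensitive 'intercept' match, first 'x' match, all 'harm' keys, all 'C' keys) and then answers each feature by a table lookup into those precomputed buckets, with no Option values and no post-filter.
import Mathlib
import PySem

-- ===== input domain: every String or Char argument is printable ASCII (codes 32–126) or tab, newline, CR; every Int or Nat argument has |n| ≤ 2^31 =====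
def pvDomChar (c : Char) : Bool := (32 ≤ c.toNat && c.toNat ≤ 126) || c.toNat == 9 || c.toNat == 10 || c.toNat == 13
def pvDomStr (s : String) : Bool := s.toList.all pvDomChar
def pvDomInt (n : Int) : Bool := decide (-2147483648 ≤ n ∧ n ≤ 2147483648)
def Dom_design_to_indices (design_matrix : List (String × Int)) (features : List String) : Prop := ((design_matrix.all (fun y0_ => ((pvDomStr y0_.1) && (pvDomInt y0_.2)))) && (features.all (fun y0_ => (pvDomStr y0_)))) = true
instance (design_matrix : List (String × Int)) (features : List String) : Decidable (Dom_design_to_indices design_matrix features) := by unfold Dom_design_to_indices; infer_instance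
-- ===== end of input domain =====

-- B replaces A's per-feature scan of the design matrix by ONE pass over the keys that
-- builds per-category buckets, which each feature then answers by table lookup; objective: alternative.


-- ===== PORT A =====
def design_coefs : List String := ["all", "intercept", "slope", "seasonality", "categorical", "rmse"]

def keyLookupIgnorecase (d : PySem.Dict String Int) (key : String) : Option String :=
  match d.keys.filter (fun k => PySem.Str.lower key == PySem.Str.lower k) with
  | [] => none
  | k :: _ => some k

-- body of A's for-loop over features (state: the two accumulating lists, with None entries kept)
def aStep (d : PySem.Dict String Int) (acc : List (Option Int) × List (Option String)) (c : String) :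
    List (Option Int) × List (Option String) :=
  if c == "intercept" then
    let k := keyLookupIgnorecase d "intercept"
    (acc.1 ++ [k.bind (fun s => d.get? s)], acc.2 ++ [k])
  else if c == "slope" then
    let k := keyLookupIgnorecase d "x"
    (acc.1 ++ [(keyLookupIgnorecase d "x").bind (fun s => d.get? s)], acc.2 ++ [k])
  else if c == "seasonality" then
    let i := d.keys.filter (fun k => PySem.Str.isIn "harm" k)
    (acc.1 ++ i.map (fun s => d.get? s), acc.2 ++ i.map some)
  else if c == "categorical" then
    let i := d.keys.filter (fun k => PySem.Str.isIn "C" k)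
    (acc.1 ++ i.map (fun s => d.get? s), acc.2 ++ i.map some)
  else acc

def design_to_indices (design_matrix : List (String × Int)) (features : List String) : List Int × List String :=
  let d := PySem.Dict.ofList design_matrix   -- the OrderedDict the Python receives
  let feats := if features.contains "all" then design_coefs.drop 1 else features
  let st := feats.foldl (aStep d) ([], [])
  (st.1.filterMap id, st.2.filterMap id)     -- the two trailing 'is not None' filters

-- ===== PORT B =====
-- body of B's single pass over the design-matrix keys: four category buckets
def bBucketStep (acc : List String × List String × List String × List String) (k : String) :
    List String × List String × List String × List String :=
  let lk := PySem.Str.lower k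
  ((if lk == "intercept" && acc.1.isEmpty then acc.1 ++ [k] else acc.1),
   (if lk == "x" && acc.2.1.isEmpty then acc.2.1 ++ [k] else acc.2.1),
   (if PySem.Str.isIn "harm" k then acc.2.2.1 ++ [k] else acc.2.2.1),
   (if PySem.Str.isIn "C" k then acc.2.2.2 ++ [k] else acc.2.2.2))

def design_to_indices_alt (design_matrix : List (String × Int)) (features : List String) : List Int × List String :=
  let d := PySem.Dict.ofList design_matrix
  let feats := if features.contains "all" then design_coefs.drop 1 else features
  let b := d.keys.foldl bBucketStep ([], [], [], [])
  let buckets : PySem.Dict String (List String) :=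
    PySem.Dict.ofList [("intercept", b.1), ("slope", b.2.1),
                       ("seasonality", b.2.2.1), ("categorical", b.2.2.2)]
  feats.foldl (fun acc c =>
      (buckets.getD c []).foldl (fun acc2 k => (acc2.1 ++ [d.getD k 0], acc2.2 ++ [k])) acc)
    ([], [])

-- ===== PRECONDITION & SPEC =====
def Spec_design_to_indices (design_matrix : List (String × Int)) (features : List String) (out : List Int × List String) : Prop := out = design_to_indices_alt design_matrix features
instance (design_matrix : List (String × Int)) (features : List String) (out : List Int × List String) : Decidable (Spec_design_to_indices design_matrix features out) := by unfold Spec_design_to_indices; infer_instance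

-- ===== CLAIM (what is proved, stated in full; the proofs are below) =====
def Claim_equal_design_to_indices : Prop := ∀ (design_matrix : List (String × Int)) (features : List String), Dom_design_to_indices design_matrix features → Spec_design_to_indices design_matrix features (design_to_indices design_matrix features)

-- ===== LEMMAS AND PROOFS =====

-- the keys B's buckets hold for feature c (proof-side characterisation)
def matchKeys (d : PySem.Dict String Int) (c : String) : List String :=
  if c == "intercept" then (d.keys.filter (fun k => PySem.Str.lower k == "intercept")).take 1
  else if c == "slope" then (d.keys.filter (fun k => PySem.Str.lower k == "x")).take 1
  else if c == "seasonality" then d.keys.filter (fun k => PySem.Str.isIn "harm" k)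
  else if c == "categorical" then d.keys.filter (fun k => PySem.Str.isIn "C" k)
  else []

-- B's one pass is four independent folds
theorem bucket_fold_split (l : List String) (a1 a2 a3 a4 : List String) :
    l.foldl bBucketStep (a1, a2, a3, a4) =
      (l.foldl (fun a k => if PySem.Str.lower k == "intercept" && a.isEmpty then a ++ [k] else a) a1,
       l.foldl (fun a k => if PySem.Str.lower k == "x" && a.isEmpty then a ++ [k] else a) a2,
       l.foldl (fun a k => if PySem.Str.isIn "harm" k then a ++ [k] else a) a3,
       l.foldl (fun a k => if PySem.Str.isIn "C" k then a ++ [k] else a) a4) := by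
  induction l generalizing a1 a2 a3 a4 with
  | nil => rfl
  | cons k t ih => simp only [List.foldl_cons, bBucketStep, ih]

-- the first-match fold is filter-take-1
theorem fold_first_match (p : String → Bool) (l : List String) :
    l.foldl (fun a k => if p k && a.isEmpty then a ++ [k] else a) [] = (l.filter p).take 1 := by
  suffices h : ∀ (acc : List String),
      l.foldl (fun a k => if p k && a.isEmpty then a ++ [k] else a) acc
        = if acc.isEmpty then (l.filter p).take 1 else acc by
    simpa using h []
  induction l with
  | nil => intro acc; cases acc <;> simp
  | cons k t ih =>
    intro acc
    simp only [List.foldl_cons, List.filter_cons]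
    cases acc with
    | cons x xs =>
      rw [if_neg (by simp)]
      simpa using ih (x :: xs)
    | nil =>
      by_cases hp : p k = true
      · rw [if_pos (by simp [hp])]
        simpa [hp] using ih [k]
      · rw [if_neg (by simp [hp])]
        simpa [hp] using ih []

theorem buckets_eq (d : PySem.Dict String Int) :
    d.keys.foldl bBucketStep ([], [], [], []) =
      ((d.keys.filter (fun k => PySem.Str.lower k == "intercept")).take 1,
       (d.keys.filter (fun k => PySem.Str.lower k == "x")).take 1,
       d.keys.filter (fun k => PySem.Str.isIn "harm" k),
       d.keys.filter (fun k => PySem.Str.isIn "C" k)) := by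
  rw [bucket_fold_split]
  rw [fold_first_match (fun k => PySem.Str.lower k == "intercept"),
      fold_first_match (fun k => PySem.Str.lower k == "x"),
      PySem.List.foldl_append_if_eq_filter, PySem.List.foldl_append_if_eq_filter]
  simp only [List.nil_append]

-- the bucket table looks up to matchKeys
theorem buckets_getD (d : PySem.Dict String Int) (c : String) :
    (PySem.Dict.ofList [("intercept", (d.keys.filter (fun k => PySem.Str.lower k == "intercept")).take 1),
                        ("slope", (d.keys.filter (fun k => PySem.Str.lower k == "x")).take 1),
                        ("seasonality", d.keys.filter (fun k => PySem.Str.isIn "harm" k)),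
                        ("categorical", d.keys.filter (fun k => PySem.Str.isIn "C" k))] :
        PySem.Dict String (List String)).getD c []
      = matchKeys d c := by
  unfold matchKeys
  by_cases h1 : c = "intercept"
  · simp [h1, PySem.Dict.ofList, PySem.Dict.update, PySem.Dict.getD_insert]
  by_cases h2 : c = "slope"
  · simp [h2, PySem.Dict.ofList, PySem.Dict.update, PySem.Dict.getD_insert]
  by_cases h3 : c = "seasonality"
  · simp [h3, PySem.Dict.ofList, PySem.Dict.update, PySem.Dict.getD_insert]
  by_cases h4 : c = "categorical"
  · simp [h4, PySem.Dict.ofList, PySem.Dict.update]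
  · simp [h1, h2, h3, h4, PySem.Dict.ofList, PySem.Dict.update, PySem.Dict.getD_insert]

-- B's inner appending loop over a key list
theorem inner_fold (d : PySem.Dict String Int) (l : List String) (acc : List Int × List String) :
    l.foldl (fun acc2 k => (acc2.1 ++ [d.getD k 0], acc2.2 ++ [k])) acc
      = (acc.1 ++ l.map (fun k => d.getD k 0), acc.2 ++ l) := by
  induction l generalizing acc with
  | nil => simp
  | cons k t ih => simp [ih]

-- B computes the flatMap of matchKeys with its lookups
theorem alt_eq (design_matrix : List (String × Int)) (features : List String) :
    design_to_indices_alt design_matrix features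
      = (let d := PySem.Dict.ofList design_matrix
         let feats := if features.contains "all" then design_coefs.drop 1 else features
         let names := feats.flatMap (matchKeys d)
         (names.map (fun k => d.getD k 0), names)) := by
  unfold design_to_indices_alt
  simp only [buckets_eq, buckets_getD, inner_fold]
  rw [PySem.List.foldl_prod_mk
      (f := fun a c => a ++ (matchKeys (PySem.Dict.ofList design_matrix) c).map
            (fun k => (PySem.Dict.ofList design_matrix).getD k 0))
      (g := fun a c => a ++ matchKeys (PySem.Dict.ofList design_matrix) c)]
  simp only [PySem.List.foldl_append_eq_flatMap, List.nil_append, List.map_flatMap]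

-- keys of d look up to their getD value
theorem get?_of_mem_keys (d : PySem.Dict String Int) (s : String) (h : s ∈ d.keys) :
    d.get? s = some (d.getD s 0) := by
  cases hg : d.get? s with
  | none =>
      have := (PySem.Dict.get?_eq_none_iff_contains d s).mp hg
      rw [(PySem.Dict.contains_iff_mem_keys d s).mpr h] at this
      exact absurd this (by simp)
  | some v => rw [PySem.Dict.getD_of_get?_eq_some d 0 hg]

theorem filterMap_get?_of_mem (d : PySem.Dict String Int) (l : List String) (h : ∀ s ∈ l, s ∈ d.keys) :
    (l.map (fun s => d.get? s)).filterMap id = l.map (fun s => d.getD s 0) := by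
  induction l with
  | nil => rfl
  | cons a t ih =>
    simp only [List.map_cons, List.filterMap_cons,
      get?_of_mem_keys d a (h a (by simp)), id]
    exact congrArg _ (ih (fun s hs => h s (by simp [hs])))

theorem beq_comm_str (a b : String) : (a == b) = (b == a) := by
  by_cases h : a = b
  · simp [h]
  · simp [h, Ne.symm h]

-- A's case-insensitive lookup is head? of the filtered key list, for an already-lower literal key
theorem kli_lit (d : PySem.Dict String Int) (key : String) (hkey : PySem.Str.lower key = key) :
    keyLookupIgnorecase d key
      = (d.keys.filter (fun k => PySem.Str.lower k == key)).head? := by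
  unfold keyLookupIgnorecase
  rw [show (fun k => PySem.Str.lower key == PySem.Str.lower k)
        = (fun k => PySem.Str.lower k == key) from
      funext fun k => by rw [hkey, beq_comm_str]]
  cases d.keys.filter (fun k => PySem.Str.lower k == key) <;> rfl

theorem filterMap_option (k : Option String) : [k].filterMap id = k.toList := by
  cases k <;> rfl

theorem mem_of_head?_filter {l : List String} {p : String → Bool} {s : String}
    (h : (l.filter p).head? = some s) : s ∈ l :=
  List.mem_of_mem_filter (List.mem_of_mem_head? (Option.mem_def.mpr h))

theorem take_one_eq_head?_toList (l : List String) : l.take 1 = l.head?.toList := by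
  cases l <;> rfl

-- per-feature: A's appended name entries, filtered, are matchKeys
theorem step_names (d : PySem.Dict String Int) (c : String) :
    ((aStep d ([], []) c).2).filterMap id = matchKeys d c := by
  unfold aStep matchKeys
  split_ifs with h1 h2 h3 h4
  · simp only [List.nil_append, filterMap_option,
      kli_lit d "intercept" (by decide), take_one_eq_head?_toList]
  · simp only [List.nil_append, filterMap_option,
      kli_lit d "x" (by decide), take_one_eq_head?_toList]
  · simp [List.filterMap_map]
  · simp [List.filterMap_map]
  · rfl

-- per-feature: A's appended value entries, filtered, are the values of matchKeys
theorem step_vals_lookup (d : PySem.Dict String Int) (key : String) (hkey : PySem.Str.lower key = key) :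
    [(keyLookupIgnorecase d key).bind (fun s => d.get? s)].filterMap id
      = ((d.keys.filter (fun k => PySem.Str.lower k == key)).take 1).map (fun k => d.getD k 0) := by
  rw [take_one_eq_head?_toList]
  cases hk : keyLookupIgnorecase d key with
  | none =>
      rw [kli_lit d key hkey] at hk
      rw [hk]; rfl
  | some s =>
      have hmem : s ∈ d.keys := mem_of_head?_filter (by rw [← kli_lit d key hkey]; exact hk)
      rw [kli_lit d key hkey] at hk
      rw [hk]
      simp [get?_of_mem_keys d s hmem]

theorem step_vals (d : PySem.Dict String Int) (c : String) :
    ((aStep d ([], []) c).1).filterMap id = (matchKeys d c).map (fun k => d.getD k 0) := by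
  unfold aStep matchKeys
  split_ifs with h1 h2 h3 h4
  · simpa using step_vals_lookup d "intercept" (by decide)
  · simpa using step_vals_lookup d "x" (by decide)
  · simpa using filterMap_get?_of_mem d _ (fun s hs => List.mem_of_mem_filter hs)
  · simpa using filterMap_get?_of_mem d _ (fun s hs => List.mem_of_mem_filter hs)
  · rfl

-- the A loop body always appends to both components
theorem aStep_append (d : PySem.Dict String Int) (acc : List (Option Int) × List (Option String)) (c : String) :
    aStep d acc c = (acc.1 ++ (aStep d ([], []) c).1, acc.2 ++ (aStep d ([], []) c).2) := by
  unfold aStep; split_ifs <;> simp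

-- A's whole loop, filtered, is the flatMap of matchKeys
theorem loop_eq (d : PySem.Dict String Int) (feats : List String)
    (acc : List (Option Int) × List (Option String)) :
    (((feats.foldl (aStep d) acc).1).filterMap id, ((feats.foldl (aStep d) acc).2).filterMap id)
      = (acc.1.filterMap id ++ (feats.flatMap (matchKeys d)).map (fun k => d.getD k 0),
         acc.2.filterMap id ++ feats.flatMap (matchKeys d)) := by
  induction feats generalizing acc with
  | nil => simp
  | cons c t ih =>
    simp only [List.foldl_cons, List.flatMap_cons]
    rw [aStep_append]
    have h := ih (acc.1 ++ (aStep d ([], []) c).1, acc.2 ++ (aStep d ([], []) c).2)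
    simp only [List.filterMap_append, step_names, step_vals] at h
    rw [h]
    simp [List.map_append]

-- ===== VERDICT (by name: the statement is the Claim_ definition above) =====
theorem design_to_indices_spec : Claim_equal_design_to_indices := by
  intro design_matrix features _
  unfold Spec_design_to_indices design_to_indices
  rw [alt_eq]
  have := loop_eq (PySem.Dict.ofList design_matrix)
      (if features.contains "all" then design_coefs.drop 1 else features) ([], [])
  simpa using this
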